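-- pv_equiv track=rewrite | github.com/Vineet1877/Python | Task-3/util.py | separateUser
-- ===== SOURCE A (Python) =====
-- def separateUser(dictionary):
--     array = [None, None, None, None, None, None, None, None]
--
--     for name, age in dictionary.items():
--         if 18 <= age <= 35:
--             if array[0] is None or age < array[0][1]:
--                 array[0] = (name, age)
--             if array[1] is None or age > array[1][1]:
--                 array[1] = (name, age)
--         elif 36 <= age <= 50:
--             if array[2] is None or age < array[2][1]:
--                 array[2] = (name, age)
--             if array[3] is None or age > array[3][1]:
--                 array[3] = (name, age)
--         elif 51 <= age <= 65:
--             if array[4] is None or age < array[4][1]: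
--                 array[4] = (name, age)
--             if array[5] is None or age > array[5][1]:
--                 array[5] = (name, age)
--         elif 66 <= age <= 90:
--             if array[6] is None or age < array[6][1]:
--                 array[6] = (name, age)
--             if array[7] is None or age > array[7][1]:
--                 array[7] = (name, age)
--
--     return array
-- ===== SOURCE B (Python) =====
-- def separateUser(dictionary):
--     # Bucket users per age bracket first, then take min/max per bucket.
--     young, mid, senior, elder = [], [], [], []
--     for name, age in dictionary.items():
--         if 18 <= age <= 35:
--             young.append((name, age))
--         elif 36 <= age <= 50:
--             mid.append((name, age))
--         elif 51 <= age <= 65: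
--             senior.append((name, age))
--         elif 66 <= age <= 90:
--             elder.append((name, age))
--     array = []
--     for bucket in (young, mid, senior, elder):
--         if bucket:
--             array.append(min(bucket, key=lambda p: p[1]))
--             array.append(max(bucket, key=lambda p: p[1]))
--         else:
--             array.extend((None, None))
--     return array
-- ===== Notes on version B (the rewrite author's own statement) =====
-- stated objective: alternative
-- what changed: B first partitions users into four age-bracket buckets and then takes min/max (key=age) per bucket, instead of A's single pass maintaining eight running min/max slots with branched in-place updates.
import Mathlib
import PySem

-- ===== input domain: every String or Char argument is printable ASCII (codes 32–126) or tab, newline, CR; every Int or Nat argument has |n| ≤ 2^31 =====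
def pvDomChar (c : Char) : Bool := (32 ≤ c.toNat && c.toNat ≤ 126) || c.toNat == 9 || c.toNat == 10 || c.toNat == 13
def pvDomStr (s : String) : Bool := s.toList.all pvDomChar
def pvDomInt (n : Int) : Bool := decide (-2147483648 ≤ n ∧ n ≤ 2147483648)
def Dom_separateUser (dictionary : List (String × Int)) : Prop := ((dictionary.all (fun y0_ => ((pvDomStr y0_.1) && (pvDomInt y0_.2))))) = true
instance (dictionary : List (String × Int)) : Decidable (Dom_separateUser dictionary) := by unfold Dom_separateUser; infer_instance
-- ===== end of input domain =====

-- B partitions users into four age-bracket buckets then takes min/max per bucket,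
-- instead of A's single pass over eight running min/max slots (objective: alternative decomposition; same value proved).

-- ===== PORT A =====
-- state: the eight array slots array[0] … array[7]
def pvS8 : Type := Option (String × Int) × Option (String × Int) × Option (String × Int) × Option (String × Int) × Option (String × Int) × Option (String × Int) × Option (String × Int) × Option (String × Int)

-- "if array[i] is None or age < array[i][1]: array[i] = (name, age)"
def pvMinUpd (cur : Option (String × Int)) (x : String × Int) : Option (String × Int) :=
  match cur with
  | none => some x
  | some m => if x.2 < m.2 then some x else cur

-- "if array[i] is None or age > array[i][1]: array[i] = (name, age)"
def pvMaxUpd (cur : Option (String × Int)) (x : String × Int) : Option (String × Int) :=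
  match cur with
  | none => some x
  | some m => if m.2 < x.2 then some x else cur

def pvStepA (s : pvS8) (x : String × Int) : pvS8 :=
  match s with
  | (a0, a1, a2, a3, a4, a5, a6, a7) =>
    if 18 ≤ x.2 ∧ x.2 ≤ 35 then (pvMinUpd a0 x, pvMaxUpd a1 x, a2, a3, a4, a5, a6, a7)
    else if 36 ≤ x.2 ∧ x.2 ≤ 50 then (a0, a1, pvMinUpd a2 x, pvMaxUpd a3 x, a4, a5, a6, a7)
    else if 51 ≤ x.2 ∧ x.2 ≤ 65 then (a0, a1, a2, a3, pvMinUpd a4 x, pvMaxUpd a5 x, a6, a7)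
    else if 66 ≤ x.2 ∧ x.2 ≤ 90 then (a0, a1, a2, a3, a4, a5, pvMinUpd a6 x, pvMaxUpd a7 x)
    else (a0, a1, a2, a3, a4, a5, a6, a7)

def separateUser (dictionary : List (String × Int)) : List (Option (String × Int)) :=
  let s := dictionary.foldl pvStepA (none, none, none, none, none, none, none, none)
  [s.1, s.2.1, s.2.2.1, s.2.2.2.1, s.2.2.2.2.1, s.2.2.2.2.2.1, s.2.2.2.2.2.2.1, s.2.2.2.2.2.2.2]

-- ===== PORT B =====
-- state: the four buckets (young, mid, senior, elder)
def pvB4 : Type := List (String × Int) × List (String × Int) × List (String × Int) × List (String × Int)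

def pvStepB (b : pvB4) (x : String × Int) : pvB4 :=
  if 18 ≤ x.2 ∧ x.2 ≤ 35 then (b.1 ++ [x], b.2.1, b.2.2.1, b.2.2.2)
  else if 36 ≤ x.2 ∧ x.2 ≤ 50 then (b.1, b.2.1 ++ [x], b.2.2.1, b.2.2.2)
  else if 51 ≤ x.2 ∧ x.2 ≤ 65 then (b.1, b.2.1, b.2.2.1 ++ [x], b.2.2.2)
  else if 66 ≤ x.2 ∧ x.2 ≤ 90 then (b.1, b.2.1, b.2.2.1, b.2.2.2 ++ [x])
  else b

-- "if bucket: append min, max  else: extend (None, None)"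
def pvPair (bucket : List (String × Int)) : List (Option (String × Int)) :=
  if bucket = [] then [none, none]
  else [PySem.List.min? bucket (fun p => p.2), PySem.List.max? bucket (fun p => p.2)]

def separateUser_alt (dictionary : List (String × Int)) : List (Option (String × Int)) :=
  let b := dictionary.foldl pvStepB ([], [], [], [])
  pvPair b.1 ++ pvPair b.2.1 ++ pvPair b.2.2.1 ++ pvPair b.2.2.2

-- ===== PRECONDITION & SPEC =====
def Spec_separateUser (dictionary : List (String × Int)) (out : List (Option (String × Int))) : Prop := out = separateUser_alt dictionary
instance (dictionary : List (String × Int)) (out : List (Option (String × Int))) : Decidable (Spec_separateUser dictionary out) := by unfold Spec_separateUser; infer_instance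

-- ===== CLAIM (what is proved, stated in full; the proofs are below) =====
def Claim_equal_separateUser : Prop := ∀ (dictionary : List (String × Int)), Dom_separateUser dictionary → Spec_separateUser dictionary (separateUser dictionary)

-- ===== LEMMAS AND PROOFS =====

def pvQ1 (x : String × Int) : Bool := decide (18 ≤ x.2 ∧ x.2 ≤ 35)
def pvQ2 (x : String × Int) : Bool := decide (36 ≤ x.2 ∧ x.2 ≤ 50)
def pvQ3 (x : String × Int) : Bool := decide (51 ≤ x.2 ∧ x.2 ≤ 65)
def pvQ4 (x : String × Int) : Bool := decide (66 ≤ x.2 ∧ x.2 ≤ 90)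

-- A's fold computes, per slot, the running min/max fold over the bucket's filter
theorem pvAfold_spec (xs : List (String × Int)) :
    ∀ s : pvS8, xs.foldl pvStepA s =
      ((xs.filter pvQ1).foldl pvMinUpd s.1,
       (xs.filter pvQ1).foldl pvMaxUpd s.2.1,
       (xs.filter pvQ2).foldl pvMinUpd s.2.2.1,
       (xs.filter pvQ2).foldl pvMaxUpd s.2.2.2.1,
       (xs.filter pvQ3).foldl pvMinUpd s.2.2.2.2.1,
       (xs.filter pvQ3).foldl pvMaxUpd s.2.2.2.2.2.1,
       (xs.filter pvQ4).foldl pvMinUpd s.2.2.2.2.2.2.1,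
       (xs.filter pvQ4).foldl pvMaxUpd s.2.2.2.2.2.2.2) := by
  induction xs with
  | nil => intro s; rfl
  | cons x xs ih =>
    intro s
    obtain ⟨a0, a1, a2, a3, a4, a5, a6, a7⟩ := s
    rw [List.foldl_cons, ih]
    simp only [pvStepA, pvQ1, pvQ2, pvQ3, pvQ4, List.filter_cons, decide_eq_true_eq]
    by_cases h1 : 18 ≤ x.2 ∧ x.2 ≤ 35
    · have h2 : ¬(36 ≤ x.2 ∧ x.2 ≤ 50) := by omega
      have h3 : ¬(51 ≤ x.2 ∧ x.2 ≤ 65) := by omega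
      have h4 : ¬(66 ≤ x.2 ∧ x.2 ≤ 90) := by omega
      simp [h1, h2, h3, h4, pvMinUpd, pvMaxUpd]
    · by_cases h2 : 36 ≤ x.2 ∧ x.2 ≤ 50
      · have h3 : ¬(51 ≤ x.2 ∧ x.2 ≤ 65) := by omega
        have h4 : ¬(66 ≤ x.2 ∧ x.2 ≤ 90) := by omega
        simp [h1, h2, h3, h4]
      · by_cases h3 : 51 ≤ x.2 ∧ x.2 ≤ 65
        · have h4 : ¬(66 ≤ x.2 ∧ x.2 ≤ 90) := by omega
          simp [h1, h2, h3, h4]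
        · by_cases h4 : 66 ≤ x.2 ∧ x.2 ≤ 90
          · simp [h1, h2, h3, h4]
          · simp [h1, h2, h3, h4]

-- B's fold collects, per bucket, the filter of the input
theorem pvBfold_spec (xs : List (String × Int)) :
    ∀ b : pvB4, xs.foldl pvStepB b =
      (b.1 ++ xs.filter pvQ1, b.2.1 ++ xs.filter pvQ2,
       b.2.2.1 ++ xs.filter pvQ3, b.2.2.2 ++ xs.filter pvQ4) := by
  induction xs with
  | nil => intro b; simp
  | cons x xs ih =>
    intro b
    obtain ⟨b1, b2, b3, b4⟩ := b
    rw [List.foldl_cons, ih]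
    simp only [pvStepB, pvQ1, pvQ2, pvQ3, pvQ4, List.filter_cons, decide_eq_true_eq]
    by_cases h1 : 18 ≤ x.2 ∧ x.2 ≤ 35
    · have h2 : ¬(36 ≤ x.2 ∧ x.2 ≤ 50) := by omega
      have h3 : ¬(51 ≤ x.2 ∧ x.2 ≤ 65) := by omega
      have h4 : ¬(66 ≤ x.2 ∧ x.2 ≤ 90) := by omega
      simp [h1, h2, h3, h4]
    · by_cases h2 : 36 ≤ x.2 ∧ x.2 ≤ 50
      · have h3 : ¬(51 ≤ x.2 ∧ x.2 ≤ 65) := by omega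
        have h4 : ¬(66 ≤ x.2 ∧ x.2 ≤ 90) := by omega
        simp [h1, h2, h3, h4]
      · by_cases h3 : 51 ≤ x.2 ∧ x.2 ≤ 65
        · have h4 : ¬(66 ≤ x.2 ∧ x.2 ≤ 90) := by omega
          simp [h1, h2, h3, h4]
        · by_cases h4 : 66 ≤ x.2 ∧ x.2 ≤ 90
          · simp [h1, h2, h3, h4]
          · simp [h1, h2, h3, h4]

-- min/max over a bucket IS the running fold A performs on it
theorem pvMin?_eq_foldl (b : List (String × Int)) :
    PySem.List.min? b (fun p => p.2) = b.foldl pvMinUpd none := by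
  unfold PySem.List.min?
  congr 1
  funext acc x
  cases acc <;> rfl

theorem pvMax?_eq_foldl (b : List (String × Int)) :
    PySem.List.max? b (fun p => p.2) = b.foldl pvMaxUpd none := by
  unfold PySem.List.max?
  congr 1
  funext acc x
  cases acc <;> rfl

theorem pvPair_eq (b : List (String × Int)) :
    pvPair b = [b.foldl pvMinUpd none, b.foldl pvMaxUpd none] := by
  unfold pvPair
  split_ifs with h
  · subst h; rfl
  · rw [pvMin?_eq_foldl, pvMax?_eq_foldl]

-- ===== VERDICT (by name: the statement is the Claim_ definition above) =====
theorem separateUser_spec : Claim_equal_separateUser := by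
  intro xs _
  show separateUser xs = separateUser_alt xs
  unfold separateUser separateUser_alt
  rw [pvAfold_spec, pvBfold_spec]
  simp [pvPair_eq]
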